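-- pv_equiv track=rewrite | github.com/dravichi/HackerRank | Problem Solving/Fair Rations.py | fairRations
-- ===== SOURCE A (Python) =====
-- def fairRations(B):
--     # Write your code here
--     if len(list(filter(lambda x: x %2 != 0, B))) % 2 == 0:
--         res = 0
--         for i in range(len(B)):
--             if B[i] % 2 == 1:
--                 B[i] += 1; B[i+1] += 1
--                 res += 2
--         return str(res)
--     else:
--         return "NO"
-- ===== SOURCE B (Python) =====
-- def fairRations(B):
--     p = 0      # running parity of the prefix sum
--     count = 0  # number of odd prefix sums
--     for x in B:
--         p = (p + x) % 2
--         count += p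
--     if p == 1:
--         return "NO"
--     return str(2 * count)
-- ===== Notes on version B (the rewrite author's own statement) =====
-- stated objective: simpler
-- what changed: Replaces the filter-to-test-parity plus greedy in-place carry loop (which mutates B) by one non-mutating fold over B that tracks the running prefix-sum parity and counts odd prefixes; the answer is 2*count by the prefix-parity characterisation of the greedy.
import Mathlib
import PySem

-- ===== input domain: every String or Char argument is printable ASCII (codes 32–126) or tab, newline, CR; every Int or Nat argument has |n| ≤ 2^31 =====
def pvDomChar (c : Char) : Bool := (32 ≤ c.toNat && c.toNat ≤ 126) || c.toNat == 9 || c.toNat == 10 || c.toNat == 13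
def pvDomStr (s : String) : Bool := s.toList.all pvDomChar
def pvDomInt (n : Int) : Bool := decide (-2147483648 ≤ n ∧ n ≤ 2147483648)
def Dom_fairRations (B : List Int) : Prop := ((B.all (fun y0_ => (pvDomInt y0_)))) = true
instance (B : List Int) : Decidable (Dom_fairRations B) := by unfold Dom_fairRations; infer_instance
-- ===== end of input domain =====

-- B replaces A's filter-parity test plus greedy in-place carry loop by one non-mutating
-- prefix-parity fold (simpler). A mutates its argument list in place; B does not:
-- the equivalence proved here is about the return value only.

-- ===== PORT A =====
def fairRations (B : List Int) : String :=
  if (B.filter (fun x => PySem.Int.mod x 2 != 0)).length % 2 == 0 then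
    let st := (PySem.List.pyRange 0 (B.length : Int) 1).foldl
      (fun (st : List Int × Int) i =>
        if PySem.Int.mod (PySem.List.pyGetD st.1 i 0) 2 == 1 then
          let a1 := PySem.List.pySetD st.1 i (PySem.List.pyGetD st.1 i 0 + 1)
          let a2 := PySem.List.pySetD a1 (i + 1) (PySem.List.pyGetD a1 (i + 1) 0 + 1)
          (a2, st.2 + 2)
        else st) (B, 0)
    PySem.Int.toStr st.2
  else "NO"

-- ===== PORT B =====
def fairRations_alt (B : List Int) : String :=
  let st := B.foldl
    (fun (pc : Int × Int) x =>
      let p := PySem.Int.mod (pc.1 + x) 2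
      (p, pc.2 + p)) (0, 0)
  if st.1 == 1 then "NO" else PySem.Int.toStr (2 * st.2)

-- ===== PRECONDITION & SPEC =====
def Spec_fairRations (B : List Int) (out : String) : Prop := out = fairRations_alt B
instance (B : List Int) (out : String) : Decidable (Spec_fairRations B out) := by unfold Spec_fairRations; infer_instance

-- ===== CLAIM (what is proved, stated in full; the proofs are below) =====
def Claim_equal_fairRations : Prop := ∀ (B : List Int), Dom_fairRations B → Spec_fairRations B (fairRations B)

-- ===== LEMMAS AND PROOFS =====

-- PySem.Int.mod with positive divisor 2 is Lean's %
theorem mod_two (a : Int) : PySem.Int.mod a 2 = a % 2 :=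
  PySem.Int.mod_eq_emod_of_pos (by omega)

-- number of odd prefix-sum parities of L, entered with carry c
def refCnt : Int → List Int → Int
  | _, [] => 0
  | c, x :: L => (c + x) % 2 + refCnt ((c + x) % 2) L

-- L with carry c added to its head element (the shape A's loop leaves the unprocessed suffix in)
def addHead : Int → List Int → List Int
  | _, [] => []
  | c, x :: L => (c + x) :: L

theorem addHead_zero (L : List Int) : addHead 0 L = L := by
  cases L <;> simp [addHead]

theorem getD_mid (pre : List Int) (y : Int) (L : List Int) (d : Int) :
    PySem.List.pyGetD (pre ++ y :: L) (pre.length : Int) d = y := by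
  simp [PySem.List.pyGetD_natCast, List.getD_eq_getElem?_getD]

theorem set_mid (pre : List Int) (y v : Int) (L : List Int) :
    (pre ++ y :: L).set pre.length v = pre ++ v :: L := by
  induction pre with
  | nil => simp
  | cons a pre ih => simp [ih]

-- the second write B[i+1] += 1: in range it adds the carry to the next element,
-- at the end of the list it is the never-reached out-of-range no-op
theorem setIncAt (pre L : List Int) :
    PySem.List.pySetD (pre ++ L) (pre.length : Int)
      (PySem.List.pyGetD (pre ++ L) (pre.length : Int) 0 + 1) = pre ++ addHead 1 L := by
  cases L with
  | nil => simp [addHead, List.set_eq_of_length_le]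
  | cons y L =>
    rw [getD_mid, PySem.List.pySetD_natCast, set_mid]
    simp [addHead, add_comm]

-- A's loop over indices pre.length … pre.length + L.length, on array pre ++ addHead c L:
-- the counter grows by exactly 2 * refCnt c L
theorem loopA (L : List Int) : ∀ (pre : List Int) (c res : Int),
    ((PySem.List.pyRange (pre.length : Int) ((pre.length : Int) + (L.length : Int)) 1).foldl
      (fun (st : List Int × Int) i =>
        if (PySem.List.pyGetD st.1 i 0) % 2 == 1 then
          let a1 := PySem.List.pySetD st.1 i (PySem.List.pyGetD st.1 i 0 + 1)
          let a2 := PySem.List.pySetD a1 (i + 1) (PySem.List.pyGetD a1 (i + 1) 0 + 1)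
          (a2, st.2 + 2)
        else st) (pre ++ addHead c L, res)).2 = res + 2 * refCnt c L := by
  induction L with
  | nil =>
    intro pre c res
    rw [show ((pre.length : Int) + ((List.length ([] : List Int) : Int))) = (pre.length : Int) by simp,
      PySem.List.pyRange_one_eq_nil (le_refl _)]
    simp [refCnt]
  | cons x L ih =>
    intro pre c res
    rw [PySem.List.pyRange_one_cons (by push_cast [List.length_cons]; omega)]
    simp only [List.foldl_cons, addHead]
    rw [getD_mid]
    have hb : (pre.length : Int) + ((x :: L).length : Int)
        = ((pre ++ [c + x + 1]).length : Int) + (L.length : Int) := by simp; ring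
    have hb0 : (pre.length : Int) + ((x :: L).length : Int)
        = ((pre ++ [c + x]).length : Int) + (L.length : Int) := by simp; ring
    by_cases h1 : (c + x) % 2 = 1
    · rw [h1, if_pos (by decide)]
      rw [PySem.List.pySetD_natCast, set_mid]
      have ha1 : pre ++ (c + x + 1) :: L = (pre ++ [c + x + 1]) ++ L := by simp
      have hidx : (pre.length : Int) + 1 = ((pre ++ [c + x + 1]).length : Int) := by simp
      rw [ha1, hidx, setIncAt, hb, ih (pre ++ [c + x + 1]) 1 (res + 2)]
      simp only [refCnt, h1]
      ring
    · have h0 : (c + x) % 2 = 0 := by omega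
      rw [h0, if_neg (by decide)]
      have harr : pre ++ (c + x) :: L = (pre ++ [c + x]) ++ addHead 0 L := by
        rw [addHead_zero]; simp
      have hidx0 : (pre.length : Int) + 1 = ((pre ++ [c + x]).length : Int) := by simp
      rw [harr, hidx0, hb0, ih (pre ++ [c + x]) 0 res]
      simp only [refCnt, h0]
      ring

-- B's fold: first component is the total parity, second the odd-prefix count
theorem loopB (L : List Int) : ∀ (p c : Int), p % 2 = p →
    L.foldl
      (fun (pc : Int × Int) x =>
        let q := (pc.1 + x) % 2
        (q, pc.2 + q)) (p, c)
      = ((p + L.sum) % 2, c + refCnt p L) := by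
  induction L with
  | nil =>
    intro p c hp
    simp only [List.foldl_nil, List.sum_nil, refCnt, add_zero]
    exact Prod.ext (by omega) rfl
  | cons x L ih =>
    intro p c hp
    rw [List.foldl_cons]
    rw [ih ((p + x) % 2) (c + (p + x) % 2) (by omega)]
    simp only [List.sum_cons, refCnt, Prod.mk.injEq]
    exact ⟨by omega, by ring⟩

-- the parity of the number of odd elements is the parity of the sum
theorem filter_parity (B : List Int) :
    (B.filter (fun x => x % 2 != 0)).length % 2 = 0 ↔ B.sum % 2 = 0 := by
  induction B with
  | nil => simp
  | cons x B ih =>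
    simp only [List.filter_cons, List.sum_cons]
    by_cases h : x % 2 = 0
    · rw [show ((x % 2 : Int) != 0) = false by simp [h]]
      simp only [Bool.false_eq_true, if_false]
      rw [ih]
      omega
    · rw [show ((x % 2 : Int) != 0) = true by simp [h]]
      simp only [if_true, List.length_cons]
      rw [show ((B.filter (fun x => x % 2 != 0)).length + 1) % 2 = 0
          ↔ ¬ (B.filter (fun x => x % 2 != 0)).length % 2 = 0 by omega, ih]
      omega

-- ===== VERDICT (by name: the statement is the Claim_ definition above) =====
theorem fairRations_spec : Claim_equal_fairRations := by
  intro B _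
  unfold Spec_fairRations fairRations fairRations_alt
  simp only [mod_two]
  have hA := loopA B [] 0 0
  simp only [List.length_nil, Nat.cast_zero, zero_add, List.nil_append, addHead_zero] at hA
  have hB := loopB B 0 0 (by decide)
  simp only [zero_add] at hB
  by_cases hs : B.sum % 2 = 0
  · have hf : (B.filter (fun x => x % 2 != 0)).length % 2 = 0 :=
      (filter_parity B).mpr hs
    simp only [hB, hA, hf, hs]
    norm_num
  · have hf : ¬ (B.filter (fun x => x % 2 != 0)).length % 2 = 0 :=
      fun h => hs ((filter_parity B).mp h)
    have h1 : B.sum % 2 = 1 := by omega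
    simp only [hB, h1]
    rw [if_neg (by simpa using hf), if_pos (by decide)]
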